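-- pv_equiv track=rewrite | github.com/TristanKruse/Beer-Game-RL | environment/supply_chain.py | code_state
-- ===== SOURCE A (Python) =====
-- def code_state(state):
--     """
--     Encode the state according to predefined ranges into discrete categories.
--
--     Args:
--         state (tuple): The actual state as a tuple of inventory levels.
--
--     Returns:
--         tuple: The coded state.
--     """
--
--     # iterating over each element of the state vector and encoding it
--     coded_state = []
--     for s in state:
--         if s <= -6:
--             coded_state.append(1)
--         elif -6 < s <= -3:
--             coded_state.append(2)
--         elif -3 < s <= 0:
--             coded_state.append(3)
--         elif 0 < s <= 3:
--             coded_state.append(4)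
--         elif 3 < s <= 6:
--             coded_state.append(5)
--         elif 6 < s <= 10:
--             coded_state.append(6)
--         elif 10 < s <= 15:
--             coded_state.append(7)
--         elif 15 < s <= 20:
--             coded_state.append(8)
--         else:
--             coded_state.append(9)
--     return tuple(coded_state)
-- ===== SOURCE B (Python) =====
-- THRESHOLDS = [-6, -3, 0, 3, 6, 10, 15, 20]
--
-- def _category(x):
--     # index of the first threshold >= x (bisect_left), plus 1
--     lo, hi = 0, len(THRESHOLDS)
--     while lo < hi:
--         mid = (lo + hi) // 2
--         if THRESHOLDS[mid] < x:
--             lo = mid + 1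
--         else:
--             hi = mid
--     return lo + 1
--
-- def code_state(state):
--     return tuple(_category(s) for s in state)
-- ===== Notes on version B (the rewrite author's own statement) =====
-- stated objective: idiomatic
-- what changed: Replaces the eight-way if/elif cascade by a sorted threshold table plus a bisect_left-style binary search per element (tuple comprehension instead of append loop).
import Mathlib
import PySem

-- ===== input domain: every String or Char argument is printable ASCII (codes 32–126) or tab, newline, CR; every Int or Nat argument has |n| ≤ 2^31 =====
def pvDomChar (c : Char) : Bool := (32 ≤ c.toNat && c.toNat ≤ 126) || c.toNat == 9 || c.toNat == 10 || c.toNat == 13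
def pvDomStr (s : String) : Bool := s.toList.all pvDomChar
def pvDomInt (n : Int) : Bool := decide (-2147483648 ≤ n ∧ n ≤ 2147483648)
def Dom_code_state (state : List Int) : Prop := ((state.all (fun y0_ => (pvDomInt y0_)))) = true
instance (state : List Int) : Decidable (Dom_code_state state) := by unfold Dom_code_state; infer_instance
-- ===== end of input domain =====

-- B replaces A's eight-way if/elif cascade by a binary search over a sorted threshold table; same return value.

-- ===== PORT A =====
-- the loop 'for s in state: coded_state.append(…)' as a fold appending one code per element
def code_state (state : List Int) : List Int :=
  state.foldl (fun coded s =>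
    coded ++ [if s ≤ -6 then 1
      else if -6 < s ∧ s ≤ -3 then 2
      else if -3 < s ∧ s ≤ 0 then 3
      else if 0 < s ∧ s ≤ 3 then 4
      else if 3 < s ∧ s ≤ 6 then 5
      else if 6 < s ∧ s ≤ 10 then 6
      else if 10 < s ∧ s ≤ 15 then 7
      else if 15 < s ∧ s ≤ 20 then 8
      else 9]) []

-- ===== PORT B =====
def pvThresholds : List Int := [-6, -3, 0, 3, 6, 10, 15, 20]

-- Source B's hand-written bisect_left while-loop, as recursion on hi - lo
def pvBisect (x : Int) (lo hi : Nat) : Nat :=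
  if _h : lo < hi then
    let mid := (lo + hi) / 2
    if pvThresholds.getD mid 0 < x then pvBisect x (mid + 1) hi
    else pvBisect x lo mid
  else lo
termination_by hi - lo
decreasing_by all_goals omega

def pvCategory (x : Int) : Int := (pvBisect x 0 pvThresholds.length : Int) + 1

def code_state_alt (state : List Int) : List Int := state.map pvCategory

-- ===== PRECONDITION & SPEC =====
def Spec_code_state (state : List Int) (out : List Int) : Prop := out = code_state_alt state
instance (state : List Int) (out : List Int) : Decidable (Spec_code_state state out) := by unfold Spec_code_state; infer_instance

-- ===== CLAIM (what is proved, stated in full; the proofs are below) =====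
def Claim_equal_code_state : Prop := ∀ (state : List Int), Dom_code_state state → Spec_code_state state (code_state state)

-- ===== LEMMAS AND PROOFS =====
-- evaluation of pvBisect at each node of its recursion tree over the 8-entry table
theorem pvB_leaf (s : Int) (lo : Nat) : pvBisect s lo lo = lo := by
  rw [pvBisect]; simp

theorem pvB01 (s : Int) : pvBisect s 0 1 = if -6 < s then 1 else 0 := by
  rw [pvBisect]; simp [pvThresholds, pvB_leaf]

theorem pvB02 (s : Int) : pvBisect s 0 2 =
    if -3 < s then 2 else if -6 < s then 1 else 0 := by
  rw [pvBisect]; simp [pvThresholds, pvB_leaf, pvB01]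

theorem pvB34 (s : Int) : pvBisect s 3 4 = if 3 < s then 4 else 3 := by
  rw [pvBisect]; simp [pvThresholds, pvB_leaf]

theorem pvB04 (s : Int) : pvBisect s 0 4 =
    if 0 < s then (if 3 < s then 4 else 3)
    else if -3 < s then 2 else if -6 < s then 1 else 0 := by
  rw [pvBisect]; simp [pvThresholds, pvB34, pvB02]

theorem pvB78 (s : Int) : pvBisect s 7 8 = if 20 < s then 8 else 7 := by
  rw [pvBisect]; simp [pvThresholds, pvB_leaf]

theorem pvB56 (s : Int) : pvBisect s 5 6 = if 10 < s then 6 else 5 := by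
  rw [pvBisect]; simp [pvThresholds, pvB_leaf]

theorem pvB58 (s : Int) : pvBisect s 5 8 =
    if 15 < s then (if 20 < s then 8 else 7) else if 10 < s then 6 else 5 := by
  rw [pvBisect]; simp [pvThresholds, pvB78, pvB56]

theorem pvB08 (s : Int) : pvBisect s 0 8 =
    if 6 < s then (if 15 < s then (if 20 < s then 8 else 7) else if 10 < s then 6 else 5)
    else if 0 < s then (if 3 < s then 4 else 3)
    else if -3 < s then 2 else if -6 < s then 1 else 0 := by
  rw [pvBisect]; simp [pvThresholds, pvB58, pvB04]

theorem pvCategory_eq (s : Int) :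
    (if s ≤ -6 then (1:Int)
      else if -6 < s ∧ s ≤ -3 then 2
      else if -3 < s ∧ s ≤ 0 then 3
      else if 0 < s ∧ s ≤ 3 then 4
      else if 3 < s ∧ s ≤ 6 then 5
      else if 6 < s ∧ s ≤ 10 then 6
      else if 10 < s ∧ s ≤ 15 then 7
      else if 15 < s ∧ s ≤ 20 then 8
      else 9) = pvCategory s := by
  unfold pvCategory
  have : pvThresholds.length = 8 := by simp [pvThresholds]
  rw [this, pvB08 s]
  split_ifs <;> norm_num <;> omega

theorem code_state_eq_map (state : List Int) : code_state state = code_state_alt state := by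
  unfold code_state code_state_alt
  rw [PySem.List.foldl_append_singleton_eq_map]
  exact List.map_congr_left (fun s _ => pvCategory_eq s)

-- ===== VERDICT (by name: the statement is the Claim_ definition above) =====
theorem code_state_spec : Claim_equal_code_state :=
  fun state _ => code_state_eq_map state
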